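-- pv_equiv track=rewrite | github.com/Timoha314/Parallelepipeds-ASD10 | Parallelepipeds ASD10/asd10.py | nested_boxes_lis
-- ===== SOURCE A (Python) =====
-- def UpperBound(a, x):
--     l = 0
--     r = len(a)
--     while l < r:
--         k = (l + r) // 2
--         if x < a[k]:
--             r = k
--         else:
--             l = k + 1
--     return l
--
-- def LIS(sequence):
--     lis = []
--     for num in sequence:
--         pos = UpperBound(lis, num)
--         if pos == len(lis):
--             lis.append(num)
--         else:
--             lis[pos] = num
--     return len(lis)
--
-- def nested_boxes_lis(boxes, dim):
--     for i in range(len(boxes)):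
--         boxes[i].sort()
--     boxes.sort()
--     lis_values = []
--     for i in range(dim):
--         columns = [boxes[row][i] for row in range(len(boxes))]
--         lis_length = LIS(columns)
--         lis_values.append(lis_length)
--     return min(lis_values)
-- ===== SOURCE B (Python) =====
-- def nested_boxes_lis(boxes, dim):
--     for b in boxes:
--         b.sort()
--     boxes.sort()
--     lis_values = []
--     for i in range(dim):
--         # O(n^2) DP: dp holds (value, length of longest non-decreasing chain
--         # of column values ending at that value), in column order.
--         dp = []
--         for box in boxes:
--             x = box[i]
--             best = 0
--             for v, d in dp:
--                 if v <= x and d > best: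
--                     best = d
--             dp.append((x, best + 1))
--         longest = 0
--         for v, d in dp:
--             if d > longest:
--                 longest = d
--         lis_values.append(longest)
--     return min(lis_values)
-- ===== Notes on version B (the rewrite author's own statement) =====
-- stated objective: alternative
-- what changed: Per-column longest non-decreasing subsequence length is computed by a quadratic dynamic program over (value, chain-length) pairs instead of A's patience method (binary-searched tails array); the two in-place sorts and the final min are kept.
import Mathlib
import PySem

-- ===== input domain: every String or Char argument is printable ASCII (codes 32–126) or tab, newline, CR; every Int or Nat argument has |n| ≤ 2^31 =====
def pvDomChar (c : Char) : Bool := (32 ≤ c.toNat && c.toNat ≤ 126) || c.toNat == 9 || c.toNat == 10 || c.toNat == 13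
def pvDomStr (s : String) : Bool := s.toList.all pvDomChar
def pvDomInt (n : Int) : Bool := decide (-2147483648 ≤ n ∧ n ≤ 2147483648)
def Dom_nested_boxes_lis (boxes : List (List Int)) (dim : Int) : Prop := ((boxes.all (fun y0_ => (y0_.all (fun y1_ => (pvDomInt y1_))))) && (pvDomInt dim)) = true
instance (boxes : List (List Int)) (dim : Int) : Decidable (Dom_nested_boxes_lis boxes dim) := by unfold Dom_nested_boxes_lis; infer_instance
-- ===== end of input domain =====

-- B replaces A's patience-method LIS (binary-searched tails array) by a quadratic DP over
-- (value, chain-length) pairs; both versions sort the argument lists in place exactly alike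
-- (the equivalence proved here is about the return value; the mutation is identical in A and B).

-- ===== PORT A =====
-- UpperBound(a, x): hand-written binary search, ported as the literal while-loop.
def pvUb (a : List Int) (x : Int) (l r : Int) : Int :=
  if h : l < r then
    let k := PySem.Int.floordiv (l + r) 2
    if x < PySem.List.pyGetD a k 0 then pvUb a x l k
    else pvUb a x (k + 1) r
  else l
termination_by (r - l).toNat
decreasing_by
  · have h2 : PySem.Int.floordiv (l + r) 2 < r :=
      (PySem.Int.floordiv_lt_iff_lt_mul (by omega)).2 (by omega)
    omega
  · have h1 := PySem.Int.floordiv_two_mid_bounds (le_of_lt h)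
    omega

-- body of A's LIS loop: pos = UpperBound(lis, num); append or overwrite
def pvStepA (lis : List Int) (num : Int) : List Int :=
  let pos := pvUb lis num 0 (lis.length : Int)
  if pos = (lis.length : Int) then lis ++ [num] else PySem.List.pySetD lis pos num

def pvLIS (sequence : List Int) : Int :=
  ((sequence.foldl pvStepA []).length : Int)

def nested_boxes_lis (boxes : List (List Int)) (dim : Int) : Int :=
  let bs := boxes.map (fun b => PySem.List.sorted b (fun v => v) false)
  let sb := PySem.List.sorted bs (fun b => b) false
  let lis_values := (PySem.List.pyRange 0 dim 1).foldl (fun acc i =>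
      let columns := (PySem.List.pyRange 0 (sb.length : Int) 1).map
        (fun row => PySem.List.pyGetD (PySem.List.pyGetD sb row []) i 0)
      acc ++ [pvLIS columns]) []
  (PySem.List.min? lis_values (fun v => v)).getD 0

-- ===== PORT B =====
-- body of B's DP loop: append (x, best + 1) where best scans the dp built so far
def pvStepB (dp : List (Int × Int)) (x : Int) : List (Int × Int) :=
  dp ++ [(x, dp.foldl (fun best p => if p.1 ≤ x ∧ best < p.2 then p.2 else best) 0 + 1)]

-- 'longest' loop over the finished dp
def pvLongest (dp : List (Int × Int)) : Int :=
  dp.foldl (fun longest p => if longest < p.2 then p.2 else longest) 0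

def nested_boxes_lis_alt (boxes : List (List Int)) (dim : Int) : Int :=
  let bs := boxes.map (fun b => PySem.List.sorted b (fun v => v) false)
  let sb := PySem.List.sorted bs (fun b => b) false
  let lis_values := (PySem.List.pyRange 0 dim 1).foldl (fun acc i =>
      let dp := sb.foldl (fun dp box => pvStepB dp (PySem.List.pyGetD box i 0)) []
      acc ++ [pvLongest dp]) []
  (PySem.List.min? lis_values (fun v => v)).getD 0

-- ===== PRECONDITION & SPEC =====
-- Pre_ excludes exactly where the Python A raises: dim < 1 (min() of an empty list, ValueError)
-- and a row shorter than dim (IndexError building a column).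
def Pre_nested_boxes_lis (boxes : List (List Int)) (dim : Int) : Prop :=
  0 < dim ∧ ∀ b ∈ boxes, dim ≤ (b.length : Int)
instance (boxes : List (List Int)) (dim : Int) : Decidable (Pre_nested_boxes_lis boxes dim) := by unfold Pre_nested_boxes_lis; infer_instance
def pvWitness_nested_boxes_lis : List (List Int) × Int := ([[1, 2], [2, 0]], 2)

def Spec_nested_boxes_lis (boxes : List (List Int)) (dim : Int) (out : Int) : Prop := out = nested_boxes_lis_alt boxes dim
instance (boxes : List (List Int)) (dim : Int) (out : Int) : Decidable (Spec_nested_boxes_lis boxes dim out) := by unfold Spec_nested_boxes_lis; infer_instance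

-- ===== CLAIM (what is proved, stated in full; the proofs are below) =====
def Claim_equal_nested_boxes_lis : Prop := ∀ (boxes : List (List Int)) (dim : Int), Dom_nested_boxes_lis boxes dim → Pre_nested_boxes_lis boxes dim → Spec_nested_boxes_lis boxes dim (nested_boxes_lis boxes dim)

-- ===== LEMMAS AND PROOFS =====

theorem getD_set_eq (l : List Int) (n : Nat) (v : Int) (hn : n < l.length) (m : Nat) :
    (l.set n v).getD m 0 = if m = n then v else l.getD m 0 := by
  by_cases hm : m = n
  · subst hm; simp [List.getD_eq_getElem?_getD, hn]
  · simp [List.getD_eq_getElem?_getD, hm, List.getElem?_set_ne (Ne.symm hm)]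

theorem pvBest_mono (dp : List (Int × Int)) (x b : Int) :
    b ≤ dp.foldl (fun best p => if p.1 ≤ x ∧ best < p.2 then p.2 else best) b := by
  induction dp generalizing b with
  | nil => simp
  | cons h t ih =>
    simp only [List.foldl_cons]
    refine le_trans ?_ (ih _)
    split <;> omega
theorem pvBest_ge (dp : List (Int × Int)) (x b : Int) (p : Int × Int)
    (hp : p ∈ dp) (hx : p.1 ≤ x) :
    p.2 ≤ dp.foldl (fun best q => if q.1 ≤ x ∧ best < q.2 then q.2 else best) b := by
  induction dp generalizing b with
  | nil => simp at hp
  | cons h t ih =>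
    simp only [List.foldl_cons]
    rcases List.mem_cons.1 hp with rfl | hp'
    · refine le_trans ?_ (pvBest_mono t x _)
      split <;> rename_i hc
      · exact le_refl _
      · omega
    · exact ih _ hp'
theorem pvBest_cases (dp : List (Int × Int)) (x b : Int) :
    dp.foldl (fun best q => if q.1 ≤ x ∧ best < q.2 then q.2 else best) b = b ∨
      ∃ p ∈ dp, p.1 ≤ x ∧ dp.foldl (fun best q => if q.1 ≤ x ∧ best < q.2 then q.2 else best) b = p.2 := by
  induction dp generalizing b with
  | nil => left; rfl
  | cons h t ih =>
    simp only [List.foldl_cons]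
    split <;> rename_i hc
    · rcases ih h.2 with h1 | ⟨p, hp, hx, he⟩
      · right; exact ⟨h, List.mem_cons_self, hc.1, h1⟩
      · right; exact ⟨p, List.mem_cons_of_mem _ hp, hx, he⟩
    · rcases ih b with h1 | ⟨p, hp, hx, he⟩
      · left; exact h1
      · right; exact ⟨p, List.mem_cons_of_mem _ hp, hx, he⟩
theorem pvLongest_mono (dp : List (Int × Int)) (b : Int) :
    b ≤ dp.foldl (fun longest p => if longest < p.2 then p.2 else longest) b := by
  induction dp generalizing b with
  | nil => simp
  | cons h t ih =>
    simp only [List.foldl_cons]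
    refine le_trans ?_ (ih _)
    split <;> omega
theorem pvLongest_ge (dp : List (Int × Int)) (b : Int) (p : Int × Int) (hp : p ∈ dp) :
    p.2 ≤ dp.foldl (fun longest q => if longest < q.2 then q.2 else longest) b := by
  induction dp generalizing b with
  | nil => simp at hp
  | cons h t ih =>
    simp only [List.foldl_cons]
    rcases List.mem_cons.1 hp with rfl | hp'
    · refine le_trans ?_ (pvLongest_mono t _)
      split <;> omega
    · exact ih _ hp'
theorem pvLongest_cases (dp : List (Int × Int)) (b : Int) :
    dp.foldl (fun longest q => if longest < q.2 then q.2 else longest) b = b ∨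
      ∃ p ∈ dp, dp.foldl (fun longest q => if longest < q.2 then q.2 else longest) b = p.2 := by
  induction dp generalizing b with
  | nil => left; rfl
  | cons h t ih =>
    simp only [List.foldl_cons]
    split <;> rename_i hc
    · rcases ih h.2 with h1 | ⟨p, hp, he⟩
      · right; exact ⟨h, List.mem_cons_self, h1⟩
      · right; exact ⟨p, List.mem_cons_of_mem _ hp, he⟩
    · rcases ih b with h1 | ⟨p, hp, he⟩
      · left; exact h1
      · right; exact ⟨p, List.mem_cons_of_mem _ hp, he⟩

theorem pvUb_spec (a : List Int) (x : Int)
    (hmono : ∀ i j : Nat, i ≤ j → j < a.length → a.getD i 0 ≤ a.getD j 0) :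
    ∀ (n : Nat) (l r : Int), (r - l).toNat ≤ n → 0 ≤ l → l ≤ r → r ≤ (a.length : Int) →
    (∀ k : Nat, (k : Int) < l → a.getD k 0 ≤ x) →
    ((r : Int) < (a.length : Int) → x < a.getD r.toNat 0) →
    l ≤ pvUb a x l r ∧ pvUb a x l r ≤ r ∧
      (∀ k : Nat, (k : Int) < pvUb a x l r → a.getD k 0 ≤ x) ∧
      (pvUb a x l r < (a.length : Int) → x < a.getD (pvUb a x l r).toNat 0) := by
  intro n
  induction n with
  | zero =>
    intro l r hn h0 hlr hrlen hL hR
    have hrl : r = l := by omega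
    rw [pvUb]
    rw [dif_neg (by omega)]
    subst hrl
    exact ⟨le_refl _, le_refl _, hL, hR⟩
  | succ n ih =>
    intro l r hn h0 hlr hrlen hL hR
    by_cases h : l < r
    · rw [pvUb, dif_pos h]
      have hmid := PySem.Int.floordiv_two_mid_bounds (le_of_lt h)
      have hk2 : PySem.Int.floordiv (l + r) 2 < r :=
        (PySem.Int.floordiv_lt_iff_lt_mul (by omega)).2 (by omega)
      set k := PySem.Int.floordiv (l + r) 2 with hk
      have hkget : PySem.List.pyGetD a k 0 = a.getD k.toNat 0 := by
        have h1 := PySem.List.pyGetD_eq_getElem (xs := a) (d := (0:Int))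
          (show (0:Int) ≤ k by omega) (show k < (a.length : Int) by exact_mod_cast (by omega : k < (a.length:Int)))
        rw [h1, List.getD_eq_getElem _ _ (by omega)]
      by_cases hc : x < PySem.List.pyGetD a k 0
      · rw [if_pos hc]
        rw [hkget] at hc
        have H := ih l k (by omega) h0 (by omega) (by omega) hL (fun _ => hc)
        exact ⟨H.1, le_trans H.2.1 (le_of_lt hk2), H.2.2.1, H.2.2.2⟩
      · rw [if_neg hc]
        rw [not_lt] at hc
        rw [hkget] at hc
        have H := ih (k + 1) r (by omega) (by omega) (by omega) hrlen
          (fun j hj => by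
            have := hmono j k.toNat (by omega) (by omega)
            calc a.getD j 0 ≤ a.getD k.toNat 0 := this
              _ ≤ x := hc) hR
        exact ⟨by omega, H.2.1, H.2.2⟩
    · rw [pvUb, dif_neg h]
      have : l = r := by omega
      subst this
      exact ⟨le_refl _, le_refl _, hL, hR⟩

-- ---- the joint invariant tying A's tails array to B's dp table ----
def pvInv (lis : List Int) (dp : List (Int × Int)) : Prop :=
  (∀ i j : Nat, i ≤ j → j < lis.length → lis.getD i 0 ≤ lis.getD j 0) ∧
  (∀ (k : Nat) (x : Int), (k < lis.length ∧ lis.getD k 0 ≤ x) ↔ ∃ p ∈ dp, (k : Int) < p.2 ∧ p.1 ≤ x)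

theorem pvInv_step (lis : List Int) (dp : List (Int × Int)) (num : Int)
    (h : pvInv lis dp) : pvInv (pvStepA lis num) (pvStepB dp num) := by
  obtain ⟨hmono, hiff⟩ := h
  have HU := pvUb_spec lis num hmono lis.length 0 (lis.length : Int) (by omega) (by omega)
    (by omega) (by omega) (fun k hk => absurd hk (by omega)) (fun hlt => absurd hlt (by omega))
  have hbest : dp.foldl (fun best p => if p.1 ≤ num ∧ best < p.2 then p.2 else best) 0
      = pvUb lis num 0 (lis.length : Int) := by
    obtain ⟨hu0, huL, hUle, hUgt⟩ := HU
    have hle1 : pvUb lis num 0 (lis.length : Int)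
        ≤ dp.foldl (fun best p => if p.1 ≤ num ∧ best < p.2 then p.2 else best) 0 := by
      rcases eq_or_lt_of_le hu0 with h0 | hpos
      · rw [← h0]; exact pvBest_mono dp num 0
      · have h1 := hUle (pvUb lis num 0 (lis.length : Int) - 1).toNat (by omega)
        obtain ⟨p, hp, hplt, hpx⟩ :=
          (hiff (pvUb lis num 0 (lis.length : Int) - 1).toNat num).1 ⟨by omega, h1⟩
        have := pvBest_ge dp num 0 p hp hpx
        omega
    have hle2 : dp.foldl (fun best p => if p.1 ≤ num ∧ best < p.2 then p.2 else best) 0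
        ≤ pvUb lis num 0 (lis.length : Int) := by
      rcases pvBest_cases dp num 0 with he | ⟨p, hp, hpx, he⟩
      · omega
      · rw [he]
        by_contra hgt
        rw [not_le] at hgt
        obtain ⟨hkL, hgd⟩ :=
          (hiff (pvUb lis num 0 (lis.length : Int)).toNat num).2 ⟨p, hp, by omega, hpx⟩
        have := hUgt (by omega)
        omega
    omega
  unfold pvStepA pvStepB
  rw [hbest]
  revert HU
  generalize pvUb lis num 0 (lis.length : Int) = u
  intro HU
  obtain ⟨hu0, huL, hUle, hUgt⟩ := HU
  by_cases hcase : u = (lis.length : Int)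
  · rw [if_pos hcase]
    constructor
    · -- monotone after append
      intro i j hij hj
      simp only [List.length_append, List.length_cons, List.length_nil] at hj
      by_cases hjL : j < lis.length
      · rw [List.getD_append _ _ _ _ hjL, List.getD_append _ _ _ _ (by omega)]
        exact hmono i j hij hjL
      · have hjeq : j = lis.length := by omega
        subst hjeq
        rw [List.getD_append_right _ _ _ _ (le_refl _), Nat.sub_self]
        by_cases hiL : i < lis.length
        · rw [List.getD_append _ _ _ _ hiL]
          exact hUle i (by omega)
        · have : i = lis.length := by omega
          subst this
          rw [List.getD_append_right _ _ _ _ (le_refl _), Nat.sub_self]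
    · intro k x
      constructor
      · rintro ⟨hk, hgd⟩
        simp only [List.length_append, List.length_cons, List.length_nil] at hk
        by_cases hkL : k < lis.length
        · rw [List.getD_append _ _ _ _ hkL] at hgd
          obtain ⟨p, hp, hplt, hpx⟩ := (hiff k x).1 ⟨hkL, hgd⟩
          exact ⟨p, List.mem_append_left _ hp, hplt, hpx⟩
        · have hkeq : k = lis.length := by omega
          subst hkeq
          rw [List.getD_append_right _ _ _ _ (le_refl _), Nat.sub_self] at hgd
          exact ⟨(num, u + 1), List.mem_append_right _ (by simp), by omega, hgd⟩
      · rintro ⟨p, hp, hplt, hpx⟩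
        rcases List.mem_append.1 hp with hp' | hp'
        · obtain ⟨hkL, hgd⟩ := (hiff k x).2 ⟨p, hp', hplt, hpx⟩
          refine ⟨by simp; omega, ?_⟩
          rw [List.getD_append _ _ _ _ hkL]
          exact hgd
        · simp only [List.mem_cons, List.not_mem_nil, or_false] at hp'
          subst hp'
          simp only at hplt hpx
          have hkle : (k : Int) ≤ u := by omega
          refine ⟨by simp; omega, ?_⟩
          by_cases hkL : k < lis.length
          · rw [List.getD_append _ _ _ _ hkL]
            exact le_trans (hUle k (by omega)) hpx
          · have : k = lis.length := by omega
            subst this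
            rw [List.getD_append_right _ _ _ _ (le_refl _), Nat.sub_self]
            exact hpx
  · rw [if_neg hcase]
    have huLt : u < (lis.length : Int) := lt_of_le_of_ne huL hcase
    rw [PySem.List.pySetD_of_nonneg _ _ hu0]
    have hgt := hUgt huLt
    have hset := fun m => getD_set_eq lis u.toNat num (by omega) m
    constructor
    · intro i j hij hj
      rw [List.length_set] at hj
      rw [hset i, hset j]
      by_cases hju : j = u.toNat
      · subst hju
        by_cases hiu : i = u.toNat
        · simp [hiu]
        · rw [if_neg hiu, if_pos rfl]
          exact hUle i (by omega)
      · rw [if_neg hju]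
        by_cases hiu : i = u.toNat
        · rw [if_pos hiu]
          have h1 : lis.getD u.toNat 0 ≤ lis.getD j 0 := hmono u.toNat j (by omega) hj
          omega
        · rw [if_neg hiu]
          exact hmono i j hij hj
    · intro k x
      rw [List.length_set, hset k]
      constructor
      · rintro ⟨hk, hgd⟩
        by_cases hku : k = u.toNat
        · rw [if_pos hku] at hgd
          exact ⟨(num, u + 1), List.mem_append_right _ (by simp), by omega, hgd⟩
        · rw [if_neg hku] at hgd
          obtain ⟨p, hp, hplt, hpx⟩ := (hiff k x).1 ⟨hk, hgd⟩
          exact ⟨p, List.mem_append_left _ hp, hplt, hpx⟩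
      · rintro ⟨p, hp, hplt, hpx⟩
        rcases List.mem_append.1 hp with hp' | hp'
        · obtain ⟨hkL, hgd⟩ := (hiff k x).2 ⟨p, hp', hplt, hpx⟩
          refine ⟨hkL, ?_⟩
          by_cases hku : k = u.toNat
          · rw [if_pos hku]
            subst hku
            omega
          · rw [if_neg hku]
            exact hgd
        · simp only [List.mem_cons, List.not_mem_nil, or_false] at hp'
          subst hp'
          simp only at hplt hpx
          refine ⟨by omega, ?_⟩
          by_cases hku : k = u.toNat
          · rw [if_pos hku]
            exact hpx
          · rw [if_neg hku]
            have hklt : (k : Int) < u := by omega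
            exact le_trans (hUle k hklt) hpx

theorem pvInv_fold (seq : List Int) (lis : List Int) (dp : List (Int × Int))
    (h : pvInv lis dp) : pvInv (seq.foldl pvStepA lis) (seq.foldl pvStepB dp) := by
  induction seq generalizing lis dp with
  | nil => exact h
  | cons a t ih => exact ih _ _ (pvInv_step _ _ _ h)

theorem pvInv_longest (lis : List Int) (dp : List (Int × Int)) (h : pvInv lis dp) :
    pvLongest dp = (lis.length : Int) := by
  obtain ⟨hmono, hiff⟩ := h
  unfold pvLongest
  have hle : dp.foldl (fun longest p => if longest < p.2 then p.2 else longest) 0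
      ≤ (lis.length : Int) := by
    rcases pvLongest_cases dp 0 with he | ⟨p, hp, he⟩
    · omega
    · rw [he]
      by_contra hgt
      rw [not_le] at hgt
      obtain ⟨hkL, _⟩ := (hiff lis.length p.1).2 ⟨p, hp, by omega, le_refl _⟩
      omega
  have hge : (lis.length : Int)
      ≤ dp.foldl (fun longest p => if longest < p.2 then p.2 else longest) 0 := by
    rcases Nat.eq_zero_or_pos lis.length with h0 | hpos
    · rw [h0]
      exact_mod_cast pvLongest_mono dp 0
    · obtain ⟨p, hp, hplt, _⟩ :=
        (hiff (lis.length - 1) (lis.getD (lis.length - 1) 0)).1 ⟨by omega, le_refl _⟩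
      have := pvLongest_ge dp 0 p hp
      omega
  omega

theorem pvLIS_eq (c : List Int) : pvLIS c = pvLongest (c.foldl pvStepB []) := by
  have h0 : pvInv [] [] := by
    constructor
    · intro i j _ hj; simp at hj
    · intro k x; simp
  exact (pvInv_longest _ _ (pvInv_fold c [] [] h0)).symm

theorem pvColumn_eq (sb : List (List Int)) (i : Int) :
    pvLIS ((PySem.List.pyRange 0 (sb.length : Int) 1).map
      (fun row => PySem.List.pyGetD (PySem.List.pyGetD sb row []) i 0))
    = pvLongest (sb.foldl (fun dp box => pvStepB dp (PySem.List.pyGetD box i 0)) []) := by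
  have h1 := PySem.List.map_pyGetD_pyRange_zero' (xs := sb) (d := ([] : List Int))
  have hcol : (PySem.List.pyRange 0 (sb.length : Int) 1).map
      (fun row => PySem.List.pyGetD (PySem.List.pyGetD sb row []) i 0)
      = sb.map (fun b => PySem.List.pyGetD b i 0) := by
    conv_rhs => rw [← h1]
    rw [List.map_map]
    rfl
  rw [hcol, pvLIS_eq, List.foldl_map]

-- ===== VERDICT (by name: the statement is the Claim_ definition above) =====
theorem nested_boxes_lis_spec : Claim_equal_nested_boxes_lis := by
  intro boxes dim _ _
  unfold Spec_nested_boxes_lis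
  simp only [nested_boxes_lis, nested_boxes_lis_alt]
  rw [PySem.List.foldl_append_singleton_eq_map, PySem.List.foldl_append_singleton_eq_map]
  rw [List.map_congr_left (fun i _ => pvColumn_eq _ i)]
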